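-- pv_equiv track=rewrite | github.com/manti-by/devops | lesson_32/solution_04.py | month_to_season_2
-- ===== SOURCE A (Python) =====
-- def month_to_season_2(month: int) -> str:
--     month_to_season_map = {
--         "Winter": [1, 2, 12],
--         "Spring": [3, 4, 5],
--         "Summer": [6, 7, 8],
--         "Autumn": [9, 10, 11],
--     }
--     for season, months in month_to_season_map.items():
--         if month in months:
--             return season
--     return "Not found"
-- ===== SOURCE B (Python) =====
-- def month_to_season_2(month: int) -> str:
--     seasons = ["Winter", "Spring", "Summer", "Autumn"]
--     if month in {1, 2, 3, 4, 5, 6, 7, 8, 9, 10, 11, 12}: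
--         return seasons[(int(month) % 12) // 3]
--     return "Not found"
-- ===== Notes on version B (the rewrite author's own statement) =====
-- stated objective: simpler
-- what changed: Replaced the season->months dict scan with a closed-form arithmetic index: seasons[(month % 12) // 3] after a validity check, no per-season loop.
import Mathlib
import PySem

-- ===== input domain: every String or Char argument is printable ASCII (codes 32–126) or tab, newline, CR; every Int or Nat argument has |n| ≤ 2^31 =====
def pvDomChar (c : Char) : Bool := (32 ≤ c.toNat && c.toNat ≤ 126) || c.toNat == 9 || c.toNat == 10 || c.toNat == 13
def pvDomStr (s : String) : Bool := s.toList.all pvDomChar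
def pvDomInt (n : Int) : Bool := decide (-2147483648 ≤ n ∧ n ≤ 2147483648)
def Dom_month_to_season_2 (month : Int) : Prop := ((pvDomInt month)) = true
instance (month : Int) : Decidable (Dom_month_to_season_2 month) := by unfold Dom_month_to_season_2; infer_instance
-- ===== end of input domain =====

-- B replaces A's season->months dict scan by a closed-form arithmetic index (simpler).

-- ===== PORT A =====
-- A iterates over the dict's items in insertion order, returning the first season whose list contains month.
def month_to_season_2_loop (month : Int) : List (String × List Int) → String
  | [] => "Not found"
  | (season, months) :: rest =>
      if month ∈ months then season else month_to_season_2_loop month rest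

def month_to_season_2 (month : Int) : String :=
  month_to_season_2_loop month
    [("Winter", [1, 2, 12]), ("Spring", [3, 4, 5]),
     ("Summer", [6, 7, 8]), ("Autumn", [9, 10, 11])]

-- ===== PORT B =====
def month_to_season_2_alt (month : Int) : String :=
  let seasons := ["Winter", "Spring", "Summer", "Autumn"]
  if month ∈ ([1, 2, 3, 4, 5, 6, 7, 8, 9, 10, 11, 12] : List Int) then
    -- seasons[(month % 12) // 3]: index is in [0,3], pyGet? always some here; getD is exact
    (PySem.List.pyGet? seasons (PySem.Int.floordiv (PySem.Int.mod month 12) 3)).getD ""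
  else "Not found"

-- ===== PRECONDITION & SPEC =====
def Spec_month_to_season_2 (month : Int) (out : String) : Prop := out = month_to_season_2_alt month
instance (month : Int) (out : String) : Decidable (Spec_month_to_season_2 month out) := by unfold Spec_month_to_season_2; infer_instance

-- ===== CLAIM (what is proved, stated in full; the proofs are below) =====
def Claim_equal_month_to_season_2 : Prop := ∀ (month : Int), Dom_month_to_season_2 month → Spec_month_to_season_2 month (month_to_season_2 month)

-- ===== LEMMAS AND PROOFS =====

-- ===== VERDICT (by name: the statement is the Claim_ definition above) =====
theorem month_to_season_2_spec : Claim_equal_month_to_season_2 := by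
  intro month _
  unfold Spec_month_to_season_2 month_to_season_2 month_to_season_2_alt
  by_cases h : 1 ≤ month ∧ month ≤ 12
  · obtain ⟨h1, h2⟩ := h
    interval_cases month <;> decide
  · have h1 : ¬ (month = 1 ∨ month = 2 ∨ month = 12) := by omega
    have h2 : ¬ (month = 3 ∨ month = 4 ∨ month = 5) := by omega
    have h3 : ¬ (month = 6 ∨ month = 7 ∨ month = 8) := by omega
    have h4 : ¬ (month = 9 ∨ month = 10 ∨ month = 11) := by omega
    have h5 : ¬ (month = 1 ∨ month = 2 ∨ month = 3 ∨ month = 4 ∨ month = 5 ∨ month = 6 ∨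
        month = 7 ∨ month = 8 ∨ month = 9 ∨ month = 10 ∨ month = 11 ∨ month = 12) := by omega
    simp [month_to_season_2_loop, h1, h2, h3, h4, h5]
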